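-- pv_equiv track=rewrite | github.com/JakobAZ/deliberative_convergence | libraries/distcomputing.py | nAry
-- ===== SOURCE A (Python) =====
-- def nAry(num, base):
--     """This function is meant to return a base-ary representation of num.
--     One can improve it, certainly, but until now I didn't.
--     """
--     assert base < 10, "For more than 9 alternatives we need to adjust the numerical system (e.g. to hex) for the nAry-function to work!"
--     newNum=""
--     numAlts = base
--     while num > 0:
--         newNum = str(num % base) + newNum
--         num //= base
--     newNum = "0"*(numAlts-len(newNum))+newNum
--     return newNum #as a string
-- ===== SOURCE B (Python) =====
-- def nAry(num, base):
--     """Base-ary representation of num, zero-padded to width `base`.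
--
--     Two-pass re-implementation: first determine the number of digits
--     (repeated floor division), then extract the digits most-significant
--     first by positional weights base**i.
--     """
--     assert base < 10, "For more than 9 alternatives we need to adjust the numerical system (e.g. to hex) for the nAry-function to work!"
--     n = num
--     width = 0
--     while n > 0:
--         n //= base
--         width += 1
--     digits = ""
--     i = width - 1
--     while i >= 0:
--         digits += str((num // base ** i) % base)
--         i -= 1
--     return "0" * (base - len(digits)) + digits
-- ===== Notes on version B (the rewrite author's own statement) =====
-- stated objective: alternative
-- what changed: Replaces A's single low-to-high prepend loop with a two-pass scheme: one loop that only counts the digits, then a high-to-low loop that extracts each digit positionally via (num // base**i) % base and appends it, so the string is built forward instead of by prepending.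
import Mathlib
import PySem

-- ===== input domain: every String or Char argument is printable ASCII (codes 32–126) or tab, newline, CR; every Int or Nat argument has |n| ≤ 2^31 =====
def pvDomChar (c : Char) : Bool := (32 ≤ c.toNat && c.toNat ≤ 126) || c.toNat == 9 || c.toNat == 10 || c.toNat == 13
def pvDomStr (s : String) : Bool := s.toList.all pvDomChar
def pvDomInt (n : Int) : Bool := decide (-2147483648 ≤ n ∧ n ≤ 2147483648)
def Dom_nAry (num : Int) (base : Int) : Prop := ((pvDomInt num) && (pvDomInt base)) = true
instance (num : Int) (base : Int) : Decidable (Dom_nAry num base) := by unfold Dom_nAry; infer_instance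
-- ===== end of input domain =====

-- B builds the digit string high-to-low by positional extraction (count pass + build pass)
-- instead of A's single low-to-high prepend loop; same value everywhere A returns.

-- ===== PORT A =====
-- while num > 0: newNum = str(num % base) + newNum; num //= base
-- (fuel num.toNat+1 bounds the iteration count: with base ≥ 2 the value strictly
--  decreases each step, with base < 0 the loop stops after one step; base ∈ {0,1}
--  with num > 0 — where Python raises/diverges — is outside Pre_.)
def nAryLoopA (fuel : Nat) (num : Int) (base : Int) (acc : List Char) : List Char :=
  match fuel with
  | 0 => acc
  | f+1 =>
    if 0 < num then
      nAryLoopA f (PySem.Int.floordiv num base) base (PySem.Int.toChars (PySem.Int.mod num base) ++ acc)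
    else acc

def nAry (num : Int) (base : Int) : String :=
  -- assert base < 10: AssertionError for base ≥ 10, excluded by Pre_nAry
  let newNum := nAryLoopA (num.toNat + 1) num base []
  String.ofList (PySem.List.pyRepeat ['0'] (base - (newNum.length : Int)) ++ newNum)

-- ===== PORT B =====
-- pass 1: n = num; while n > 0: n //= base; width += 1
def nAryCountB (fuel : Nat) (n : Int) (base : Int) (width : Int) : Int :=
  match fuel with
  | 0 => width
  | f+1 =>
    if 0 < n then nAryCountB f (PySem.Int.floordiv n base) base (width + 1)
    else width

-- pass 2: i = width-1; while i >= 0: digits += str((num // base**i) % base); i -= 1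
def nAryBuildB (num : Int) (base : Int) (i : Int) (digits : List Char) : List Char :=
  if 0 ≤ i then
    nAryBuildB num base (i - 1)
      (digits ++ PySem.Int.toChars (PySem.Int.mod (PySem.Int.floordiv num (base ^ i.toNat)) base))
  else digits
termination_by (i + 1).toNat
decreasing_by omega

def nAry_alt (num : Int) (base : Int) : String :=
  let width := nAryCountB (num.toNat + 1) num base 0
  let digits := nAryBuildB num base (width - 1) []
  String.ofList (PySem.List.pyRepeat ['0'] (base - (digits.length : Int)) ++ digits)

-- ===== PRECONDITION & SPEC =====
-- Pre_ excludes exactly the inputs where A does not return: base ≥ 10 (AssertionError)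
-- and base ∈ {0,1} with num > 0 (ZeroDivisionError for base = 0, an infinite loop for
-- base = 1); A returns on every other input and Pre_ admits all of them.
def Pre_nAry (num : Int) (base : Int) : Prop :=
  base < 10 ∧ (0 < num → (base < 0 ∨ 2 ≤ base))
instance (num : Int) (base : Int) : Decidable (Pre_nAry num base) := by unfold Pre_nAry; infer_instance

def pvWitness_nAry : Int × Int := (5, 2)

def Spec_nAry (num : Int) (base : Int) (out : String) : Prop := out = nAry_alt num base
instance (num : Int) (base : Int) (out : String) : Decidable (Spec_nAry num base out) := by unfold Spec_nAry; infer_instance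

-- ===== CLAIM (what is proved, stated in full; the proofs are below) =====
def Claim_equal_nAry : Prop := ∀ (num : Int) (base : Int), Dom_nAry num base → Pre_nAry num base → Spec_nAry num base (nAry num base)

-- ===== LEMMAS AND PROOFS =====

-- the digit of num at positional weight base^j, as its decimal characters
def pvDig (num base : Int) (j : Nat) : List Char :=
  PySem.Int.toChars (PySem.Int.mod (PySem.Int.floordiv num (base ^ j)) base)

-- digits of num for exponents k-1, …, 1, 0 (high to low)
def pvDstr (num base : Int) : Nat → List Char
  | 0 => []
  | k+1 => pvDig num base k ++ pvDstr num base k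

lemma nAryLoopA_acc (base : Int) :
    ∀ (fuel : Nat) (num : Int) (acc : List Char),
      nAryLoopA fuel num base acc = nAryLoopA fuel num base [] ++ acc := by
  intro fuel
  induction fuel with
  | zero => intro num acc; simp [nAryLoopA]
  | succ f ih =>
    intro num acc
    simp only [nAryLoopA]
    split_ifs with h
    · rw [ih, ih (PySem.Int.floordiv num base) (PySem.Int.toChars (PySem.Int.mod num base) ++ [])]
      simp
    · simp

lemma nAryLoopA_nonpos (base : Int) (fuel : Nat) (num : Int) (h : num ≤ 0) :
    nAryLoopA fuel num base [] = [] := by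
  cases fuel with
  | zero => rfl
  | succ f => simp [nAryLoopA, Int.not_lt.mpr h]

lemma nAryCountB_acc (base : Int) :
    ∀ (fuel : Nat) (n w : Int), nAryCountB fuel n base w = w + nAryCountB fuel n base 0 := by
  intro fuel
  induction fuel with
  | zero => intro n w; simp [nAryCountB]
  | succ f ih =>
    intro n w
    simp only [nAryCountB]
    split_ifs with h
    · rw [ih (PySem.Int.floordiv n base) (w + 1), ih (PySem.Int.floordiv n base) (0 + 1)]
      ring
    · simp

lemma nAryCountB_nonpos (base : Int) (fuel : Nat) (n : Int) (h : n ≤ 0) :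
    nAryCountB fuel n base 0 = 0 := by
  cases fuel with
  | zero => rfl
  | succ f => simp [nAryCountB, Int.not_lt.mpr h]

lemma nAryBuildB_eq_pvDstr (num base : Int) :
    ∀ (m : Nat) (i : Int), (i + 1).toNat = m → ∀ digits,
      nAryBuildB num base i digits = digits ++ pvDstr num base m := by
  intro m
  induction m with
  | zero =>
    intro i hm digits
    have hi : ¬ 0 ≤ i := by omega
    rw [nAryBuildB]
    simp [hi, pvDstr]
  | succ k ih =>
    intro i hm digits
    have hi : 0 ≤ i := by omega
    have hik : i.toNat = k := by omega
    rw [nAryBuildB]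
    simp only [hi, if_pos]
    rw [ih (i - 1) (by omega)]
    simp [pvDstr, hik, pvDig]

-- floor-division by base, then by base^k, is floor-division by base^(k+1) (base > 0)
lemma pvDstr_shift (num base : Int) (hb : 0 < base) :
    ∀ k : Nat, pvDstr num base (k + 1)
      = pvDstr (PySem.Int.floordiv num base) base k ++ PySem.Int.toChars (PySem.Int.mod num base) := by
  have hdiv : ∀ j : Nat, PySem.Int.floordiv (PySem.Int.floordiv num base) (base ^ j)
      = PySem.Int.floordiv num (base ^ (j + 1)) := by
    intro j
    have hbj : (0:Int) < base ^ j := pow_pos hb j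
    rw [PySem.Int.floordiv_eq_ediv_of_pos hb, PySem.Int.floordiv_eq_ediv_of_pos hbj,
        PySem.Int.floordiv_eq_ediv_of_pos (pow_pos hb (j + 1))]
    rw [Int.ediv_ediv_of_nonneg (le_of_lt hb), ← pow_succ']
  intro k
  induction k with
  | zero =>
    simp [pvDstr, pvDig]
  | succ k ih =>
    show pvDig num base (k + 1) ++ pvDstr num base (k + 1) = _
    rw [ih]
    simp only [pvDstr, pvDig, hdiv k, List.append_assoc]

-- core: A's loop produces exactly the high-to-low positional digits, width = B's count
lemma pvKey (base : Int) (hbase : base < 0 ∨ 2 ≤ base) :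
    ∀ (fuel : Nat) (num : Int), num.toNat < fuel →
      nAryLoopA fuel num base [] = pvDstr num base (nAryCountB fuel num base 0).toNat
      ∧ 0 ≤ nAryCountB fuel num base 0 := by
  intro fuel
  induction fuel with
  | zero => intro num h; omega
  | succ f ih =>
    intro num hfuel
    by_cases hpos : 0 < num
    · have hstep : nAryLoopA (f + 1) num base []
          = nAryLoopA f (PySem.Int.floordiv num base) base [] ++ PySem.Int.toChars (PySem.Int.mod num base) := by
        simp only [nAryLoopA, if_pos hpos]
        rw [nAryLoopA_acc base f (PySem.Int.floordiv num base)]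
        simp
      have hcnt : nAryCountB (f + 1) num base 0
          = 1 + nAryCountB f (PySem.Int.floordiv num base) base 0 := by
        simp only [nAryCountB, if_pos hpos, zero_add]
        exact nAryCountB_acc base f (PySem.Int.floordiv num base) 1
      rcases hbase with hneg | hge2
      · -- base < 0: one division makes num negative, the loop stops
        have hlt : PySem.Int.floordiv num base < 0 := by
          have h1 := PySem.Int.floordiv_mul_add_mod num base
          have h2 := (PySem.Int.mod_neg_bounds (a := num) hneg).2
          nlinarith [h1, h2]
        rw [hstep, hcnt, nAryLoopA_nonpos base f _ (le_of_lt hlt),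
            nAryCountB_nonpos base f _ (le_of_lt hlt)]
        refine ⟨?_, by omega⟩
        show [] ++ _ = pvDstr num base (1 : Int).toNat
        have h1 : PySem.Int.floordiv num (base ^ 0) = num := by
          rw [PySem.Int.floordiv_eq_ediv_of_pos (show (0:Int) < base ^ 0 by simp)]
          simp
        simp [pvDstr, pvDig]
      
      · -- 2 ≤ base: recurse; the quotient strictly decreases
        have hb : (0:Int) < base := by omega
        have hquot : PySem.Int.floordiv num base = num / base :=
          PySem.Int.floordiv_eq_ediv_of_pos hb
        have hlt : num / base < num := Int.ediv_lt_self_of_pos_of_ne_one hpos (by omega)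
        have hnn : 0 ≤ num / base := Int.ediv_nonneg (le_of_lt hpos) (le_of_lt hb)
        have hfu : (PySem.Int.floordiv num base).toNat < f := by
          rw [hquot]; omega
        obtain ⟨ihA, ihC⟩ := ih (PySem.Int.floordiv num base) hfu
        rw [hstep, hcnt, ihA]
        refine ⟨?_, by omega⟩
        have hto : ((1 + nAryCountB f (PySem.Int.floordiv num base) base 0).toNat)
            = (nAryCountB f (PySem.Int.floordiv num base) base 0).toNat + 1 := by omega
        rw [hto, pvDstr_shift num base hb]
    · -- num ≤ 0: zero iterations on both sides
      have h0 : num ≤ 0 := by omega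
      rw [nAryLoopA_nonpos base (f+1) num h0, nAryCountB_nonpos base (f+1) num h0]
      exact ⟨rfl, le_refl 0⟩

-- ===== VERDICT (by name: the statement is the Claim_ definition above) =====
theorem nAry_spec : Claim_equal_nAry := by
  intro num base _hdom hpre
  unfold Spec_nAry nAry nAry_alt
  by_cases hpos : 0 < num
  · have hbase := hpre.2 hpos
    obtain ⟨hA, hC⟩ := pvKey base hbase (num.toNat + 1) num (by omega)
    have hbuild : nAryBuildB num base (nAryCountB (num.toNat + 1) num base 0 - 1) []
        = pvDstr num base (nAryCountB (num.toNat + 1) num base 0).toNat := by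
      rw [nAryBuildB_eq_pvDstr num base (nAryCountB (num.toNat + 1) num base 0).toNat _ (by omega)]
      simp
    simp only [hA, hbuild]
  · have h0 : num ≤ 0 := by omega
    have hA := nAryLoopA_nonpos base (num.toNat + 1) num h0
    have hC := nAryCountB_nonpos base (num.toNat + 1) num h0
    have hbuild : nAryBuildB num base ((0:Int) - 1) [] = [] := by
      rw [nAryBuildB_eq_pvDstr num base 0 _ (by omega)]
      simp [pvDstr]
    simp only [hA, hC, hbuild]
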